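-- pv_equiv track=rewrite | github.com/surbhiz/Python-Practice | LeetCode/longestpass.py | solution
-- ===== SOURCE A (Python) =====
-- def solution(S):
--     longest = -1
--     num_of_letters = 0
--     num_of_digits = 0
--     num_of_others = 0
--     for letter in S:
--         if letter.isalpha():
--             num_of_letters += 1
--         elif letter.isdigit():
--             num_of_digits += 1
--         elif letter == " ":
--             # Check whether it's a valid password.
--             if num_of_others == 0 and \
--                num_of_letters % 2 == 0 and \
--                num_of_digits % 2 == 1:
--                 if longest < num_of_letters + num_of_digits:
--                     longest = num_of_letters + num_of_digits
--             # Reset the counters for the next word.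
--             num_of_letters = 0
--             num_of_digits = 0
--             num_of_others = 0
--         else:
--             num_of_others += 1
--     # Check whether the last word is a valid password.
--     if num_of_others == 0 and \
--        num_of_letters % 2 == 0 and \
--        num_of_digits % 2 == 1:
--         if longest < num_of_letters + num_of_digits:
--             longest = num_of_letters + num_of_digits
--     return longest
-- ===== SOURCE B (Python) =====
-- def solution(S):
--     longest = -1
--     for word in S.split(" "):
--         letters = sum(c.isalpha() for c in word)
--         digits = sum(c.isdigit() for c in word)
--         others = len(word) - letters - digits
--         if others == 0 and letters % 2 == 0 and digits % 2 == 1: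
--             longest = max(longest, letters + digits)
--     return longest
-- ===== Notes on version B (the rewrite author's own statement) =====
-- stated objective: simpler
-- what changed: Replaces the single character-by-character state machine with four counters and inline reset/check logic by a split on the single-space separator followed by a per-word count-and-validate pass.
import Mathlib
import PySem

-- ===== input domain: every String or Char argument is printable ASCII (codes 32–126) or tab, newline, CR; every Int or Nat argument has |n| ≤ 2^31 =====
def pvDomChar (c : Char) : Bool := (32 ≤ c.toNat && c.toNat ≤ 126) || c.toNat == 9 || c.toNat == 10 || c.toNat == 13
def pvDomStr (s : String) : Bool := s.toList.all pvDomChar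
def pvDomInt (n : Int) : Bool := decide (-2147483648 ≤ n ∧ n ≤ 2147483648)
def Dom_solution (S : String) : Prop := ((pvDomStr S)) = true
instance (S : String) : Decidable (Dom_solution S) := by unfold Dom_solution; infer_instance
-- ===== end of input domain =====

-- B replaces A's single char-by-char state machine by split-on-space plus a per-word count-and-validate pass (objective: simpler).

-- ===== PORT A =====
-- state: (longest, num_of_letters, num_of_digits, num_of_others)
def stepA (st : Int × Int × Int × Int) (c : Char) : Int × Int × Int × Int :=
  let (lg, a, d, o) := st
  if PySem.Chars.isalpha c then (lg, a + 1, d, o)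
  else if PySem.Chars.isdigit c then (lg, a, d + 1, o)
  else if c = ' ' then
    ((if o = 0 ∧ PySem.Int.mod a 2 = 0 ∧ PySem.Int.mod d 2 = 1 then
        (if lg < a + d then a + d else lg) else lg), 0, 0, 0)
  else (lg, a, d, o + 1)

def solution (S : String) : Int :=
  let st := S.toList.foldl stepA (-1, 0, 0, 0)
  let (lg, a, d, o) := st
  if o = 0 ∧ PySem.Int.mod a 2 = 0 ∧ PySem.Int.mod d 2 = 1 then
    (if lg < a + d then a + d else lg) else lg

-- ===== PORT B =====
-- sum(c.isalpha() for c in word) resp. sum(c.isdigit() for c in word)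
def cntB (p : Char → Bool) (w : List Char) : Int :=
  w.foldl (fun n c => n + (if p c then 1 else 0)) 0

def updB (lg : Int) (w : List Char) : Int :=
  let letters := cntB PySem.Chars.isalpha w
  let digits := cntB PySem.Chars.isdigit w
  let others := (w.length : Int) - letters - digits
  if others = 0 ∧ PySem.Int.mod letters 2 = 0 ∧ PySem.Int.mod digits 2 = 1 then
    max lg (letters + digits) else lg

def solution_alt (S : String) : Int :=
  (PySem.Chars.splitOn S.toList [' ']).foldl updB (-1)

-- ===== PRECONDITION & SPEC =====
def Spec_solution (S : String) (out : Int) : Prop := out = solution_alt S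
instance (S : String) (out : Int) : Decidable (Spec_solution S out) := by unfold Spec_solution; infer_instance

-- ===== CLAIM (what is proved, stated in full; the proofs are below) =====
def Claim_equal_solution : Prop := ∀ (S : String), Dom_solution S → Spec_solution S (solution S)

-- ===== LEMMAS AND PROOFS =====

-- reference split on a single space, structural on the char list
def splitSp : List Char → List (List Char)
  | [] => [[]]
  | c :: rest =>
    if c = ' ' then [] :: splitSp rest
    else match splitSp rest with
         | [] => [[c]]
         | w :: ws => (c :: w) :: ws

-- chars that are neither letters nor digits
def cntO (w : List Char) : Int :=
  cntB (fun c => !PySem.Chars.isalpha c && !PySem.Chars.isdigit c) w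

-- A's closing check / B's branch, on raw counters
def updB' (lg a d o : Int) : Int :=
  if o = 0 ∧ PySem.Int.mod a 2 = 0 ∧ PySem.Int.mod d 2 = 1 then
    (if lg < a + d then a + d else lg) else lg

theorem digit_char_bounds (c : Char) :
    PySem.Chars.isdigit c = true ↔ 48 ≤ c.val.toNat ∧ c.val.toNat ≤ 57 := by
  simp only [PySem.Chars.isdigit, Bool.and_eq_true, decide_eq_true_eq, Char.le_def,
    UInt32.le_iff_toNat_le]
  norm_num [show ('0').val.toNat = 48 from rfl, show ('9').val.toNat = 57 from rfl]

theorem alpha_char_bounds (c : Char) :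
    PySem.Chars.isalpha c = true ↔ (65 ≤ c.val.toNat ∧ c.val.toNat ≤ 90) ∨ (97 ≤ c.val.toNat ∧ c.val.toNat ≤ 122) := by
  simp only [PySem.Chars.isalpha, PySem.Chars.isupper, PySem.Chars.islower,
    Bool.or_eq_true, Bool.and_eq_true, decide_eq_true_eq, Char.le_def, UInt32.le_iff_toNat_le]
  norm_num [show ('A').val.toNat = 65 from rfl, show ('Z').val.toNat = 90 from rfl,
    show ('a').val.toNat = 97 from rfl, show ('z').val.toNat = 122 from rfl]

theorem alpha_not_digit (c : Char) (h : PySem.Chars.isalpha c = true) :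
    PySem.Chars.isdigit c = false := by
  rw [alpha_char_bounds] at h
  rw [Bool.eq_false_iff, ne_eq, digit_char_bounds]
  omega

theorem foldl_shift (p : Char → Bool) (w : List Char) : ∀ (n : Int),
    w.foldl (fun n c => n + (if p c then 1 else 0)) n = n + cntB p w := by
  induction w with
  | nil => intro n; simp [cntB]
  | cons c w ih =>
    intro n
    rw [List.foldl_cons, ih]
    conv_rhs => rw [cntB, List.foldl_cons, ih]
    ring

theorem cntB_nil (p : Char → Bool) : cntB p [] = 0 := rfl

theorem cntB_cons (p : Char → Bool) (c : Char) (w : List Char) :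
    cntB p (c :: w) = (if p c then 1 else 0) + cntB p w := by
  rw [cntB, List.foldl_cons, foldl_shift]; ring

theorem len_split (w : List Char) :
    (w.length : Int) = cntB PySem.Chars.isalpha w + cntB PySem.Chars.isdigit w + cntO w := by
  induction w with
  | nil => simp [cntB, cntO]
  | cons c w ih =>
    simp only [cntO, cntB_cons, List.length_cons] at *
    by_cases ha : PySem.Chars.isalpha c = true
    · simp [ha, alpha_not_digit c ha]; omega
    · by_cases hd : PySem.Chars.isdigit c = true
      · simp [ha, hd]; omega
      · simp [ha, hd]; omega

theorem updB_eq (lg : Int) (w : List Char) :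
    updB lg w = updB' lg (cntB PySem.Chars.isalpha w) (cntB PySem.Chars.isdigit w) (cntO w) := by
  show (if (w.length : Int) - cntB PySem.Chars.isalpha w - cntB PySem.Chars.isdigit w = 0 ∧ _ ∧ _ then _ else _) = _
  rw [len_split w]
  unfold updB'
  have ho : cntB PySem.Chars.isalpha w + cntB PySem.Chars.isdigit w + cntO w
      - cntB PySem.Chars.isalpha w - cntB PySem.Chars.isdigit w = cntO w := by ring
  rw [ho]
  split_ifs with h h2
  · exact max_eq_right (le_of_lt h2)
  · exact max_eq_left (le_of_not_gt h2)
  · rfl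

theorem splitSp_space (rest : List Char) : splitSp (' ' :: rest) = [] :: splitSp rest := by
  simp [splitSp]

theorem splitSp_ne_nil (l : List Char) : splitSp l ≠ [] := by
  cases l with
  | nil => simp [splitSp]
  | cons c rest =>
    simp only [splitSp]
    split
    · simp
    · split <;> simp

-- characterize PySem.Chars.splitOn on a single-space separator
theorem go_char (l : List Char) : ∀ (fuel : Nat) (cur : List Char) (acc : List (List Char)),
    l.length < fuel →
    PySem.Chars.splitOn.go [' '] fuel l cur acc =
      acc.reverse ++ (match splitSp l with
                      | [] => []
                      | w :: ws => (cur.reverse ++ w) :: ws) := by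
  induction l with
  | nil =>
    intro fuel cur acc h
    match fuel with
    | f + 1 => simp [PySem.Chars.splitOn.go, splitSp]
  | cons c rest ih =>
    intro fuel cur acc h
    match fuel with
    | f + 1 =>
      by_cases hc : c = ' '
      · subst hc
        have hpre : [' '].isPrefixOf (' ' :: rest) = true := by simp [List.isPrefixOf]
        rw [show PySem.Chars.splitOn.go [' '] (f+1) (' '::rest) cur acc
              = PySem.Chars.splitOn.go [' '] f rest [] (cur.reverse :: acc) from by
          simp [PySem.Chars.splitOn.go, hpre]]
        rw [ih f [] (cur.reverse :: acc) (by simpa using Nat.lt_of_succ_lt_succ h)]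
        rcases hsp : splitSp rest with _ | ⟨w, ws⟩
        · exact absurd hsp (splitSp_ne_nil rest)
        · simp [splitSp, hsp]
      · have hpre : [' '].isPrefixOf (c :: rest) = false := by
          simp [List.isPrefixOf]
          exact fun h' => hc h'.symm
        rw [show PySem.Chars.splitOn.go [' '] (f+1) (c::rest) cur acc
              = PySem.Chars.splitOn.go [' '] f rest (c :: cur) acc from by
          simp [PySem.Chars.splitOn.go, hpre]]
        rw [ih f (c :: cur) acc (by simpa using Nat.lt_of_succ_lt_succ h)]
        rcases hsp : splitSp rest with _ | ⟨w, ws⟩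
        · exact absurd hsp (splitSp_ne_nil rest)
        · simp [splitSp, hc, hsp]

theorem splitOn_eq_splitSp (l : List Char) :
    PySem.Chars.splitOn l [' '] = splitSp l := by
  have h := go_char l (l.length + 1) [] [] (by omega)
  rcases hsp : splitSp l with _ | ⟨w, ws⟩
  · exact absurd hsp (splitSp_ne_nil l)
  · rw [PySem.Chars.splitOn]
    rw [hsp] at h
    simpa using h

-- the main invariant: A's fold + closing check = B's word fold, prefix counters folded into the first word
theorem mainLemma (l : List Char) : ∀ (lg a d o : Int),
    (let st := l.foldl stepA (lg, a, d, o)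
     updB' st.1 st.2.1 st.2.2.1 st.2.2.2) =
      (match splitSp l with
       | [] => 0
       | w :: ws => ws.foldl updB
           (updB' lg (a + cntB PySem.Chars.isalpha w) (d + cntB PySem.Chars.isdigit w) (o + cntO w))) := by
  induction l with
  | nil => intro lg a d o; simp [splitSp, cntB, cntO]
  | cons c rest ih =>
    intro lg a d o
    by_cases hc : c = ' '
    · subst hc
      have h1 : stepA (lg, a, d, o) ' ' = (updB' lg a d o, 0, 0, 0) := by
        have ha : PySem.Chars.isalpha ' ' = false := by decide
        have hd : PySem.Chars.isdigit ' ' = false := by decide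
        simp [stepA, ha, hd, updB']
      rw [List.foldl_cons, h1]
      rw [ih (updB' lg a d o) 0 0 0]
      rcases hsp : splitSp rest with _ | ⟨w, ws⟩
      · exact absurd hsp (splitSp_ne_nil rest)
      · rw [splitSp_space, hsp]
        simp only [cntB_nil, add_zero, List.foldl_cons, updB_eq, zero_add, cntO, cntB_nil]
    · rcases hsp : splitSp rest with _ | ⟨w, ws⟩
      · exact absurd hsp (splitSp_ne_nil rest)
      by_cases ha : PySem.Chars.isalpha c = true
      · have h1 : stepA (lg, a, d, o) c = (lg, a + 1, d, o) := by simp [stepA, ha]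
        rw [List.foldl_cons, h1, ih lg (a+1) d o]
        simp only [hsp]
        rw [show splitSp (c :: rest) = (c :: w) :: ws from by simp [splitSp, hc, hsp]]
        simp only [cntO, cntB_cons, ha, alpha_not_digit c ha]
        norm_num
        congr 2 <;> ring
      · by_cases hd : PySem.Chars.isdigit c = true
        · have h1 : stepA (lg, a, d, o) c = (lg, a, d + 1, o) := by simp [stepA, ha, hd]
          rw [List.foldl_cons, h1, ih lg a (d+1) o]
          simp only [hsp]
          rw [show splitSp (c :: rest) = (c :: w) :: ws from by simp [splitSp, hc, hsp]]
          simp only [cntO, cntB_cons, ha, hd]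
          norm_num
          congr 2 <;> ring
        · have h1 : stepA (lg, a, d, o) c = (lg, a, d, o + 1) := by simp [stepA, ha, hd, hc]
          rw [List.foldl_cons, h1, ih lg a d (o+1)]
          simp only [hsp]
          rw [show splitSp (c :: rest) = (c :: w) :: ws from by simp [splitSp, hc, hsp]]
          simp only [cntO, cntB_cons, ha, hd]
          norm_num
          congr 2 <;> ring

-- ===== VERDICT (by name: the statement is the Claim_ definition above) =====
theorem solution_spec : Claim_equal_solution := by
  intro S _
  show solution S = solution_alt S
  show (let st := S.toList.foldl stepA (-1, 0, 0, 0)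
        updB' st.1 st.2.1 st.2.2.1 st.2.2.2) = solution_alt S
  rw [mainLemma S.toList (-1) 0 0 0]
  unfold solution_alt
  rw [splitOn_eq_splitSp]
  rcases hsp : splitSp S.toList with _ | ⟨w, ws⟩
  · exact absurd hsp (splitSp_ne_nil S.toList)
  · simp [List.foldl_cons, updB_eq, cntB, cntO]
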